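-- pv_equiv track=rewrite | github.com/SteveFreeBSD/wicap-assistant | src/wicap_assist/working_memory.py | _build_pending_actions
-- ===== SOURCE A (Python) =====
-- from typing import Any, Mapping
--
-- def _build_pending_actions(events: list[dict[str, Any]]) -> list[str]:
--     out: list[str] = []
--     seen: set[str] = set()
--     for event in events:
--         decision = str(event.get("decision", "")).strip()
--         action = str(event.get("action", "")).strip() if event.get("action") is not None else ""
--         status = str(event.get("status", "")).strip()
--         if status in {"stable", "executed_ok"}:
--             continue
--         token = action or decision
--         if not token or token in seen:
--             continue
--         seen.add(token)
--         out.append(token)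
--     return out[:8]
-- ===== SOURCE B (Python) =====
-- def _build_pending_actions(events):
--     def token_of(event):
--         status = str(event.get("status", "")).strip()
--         if status in ("stable", "executed_ok"):
--             return None
--         if event.get("action") is not None:
--             action = str(event.get("action", "")).strip()
--         else:
--             action = ""
--         return action or str(event.get("decision", "")).strip()
--
--     # Selection-style dedup: repeatedly take the leading token and purge its
--     # later duplicates from the remainder; no seen-set, cap enforced by the loop.
--     rest = [token_of(e) for e in events]
--     out = []
--     while rest and len(out) < 8:
--         t, rest = rest[0], rest[1:]
--         if t:
--             out.append(t)
--             rest = [u for u in rest if u != t]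
--     return out
-- ===== Notes on version B (the rewrite author's own statement) =====
-- stated objective: alternative
-- what changed: B drops A's seen-set single pass entirely: it tokenizes the events once, then runs a selection-style loop that repeatedly pops the leading token, emits it if truthy, and purges its duplicates from the remaining list, with the cap of 8 enforced by the loop condition instead of a final slice.
import Mathlib
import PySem

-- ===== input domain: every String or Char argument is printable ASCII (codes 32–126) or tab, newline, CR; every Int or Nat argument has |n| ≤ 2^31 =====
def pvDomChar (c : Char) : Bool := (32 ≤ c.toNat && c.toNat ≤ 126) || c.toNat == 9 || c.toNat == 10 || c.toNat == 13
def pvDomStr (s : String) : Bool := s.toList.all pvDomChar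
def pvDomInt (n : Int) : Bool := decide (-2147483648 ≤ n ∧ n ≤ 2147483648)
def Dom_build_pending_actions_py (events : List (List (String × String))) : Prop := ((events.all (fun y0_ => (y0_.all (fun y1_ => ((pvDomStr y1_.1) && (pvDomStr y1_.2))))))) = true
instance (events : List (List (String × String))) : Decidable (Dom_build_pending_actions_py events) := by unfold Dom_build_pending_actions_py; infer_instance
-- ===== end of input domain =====

-- B replaces A's single pass with a seen-set by a selection-style loop: tokenize once, then
-- repeatedly take the leading token and purge its later duplicates (alternative; same result).

-- ===== PORT A =====
def build_pending_actions_py (events : List (List (String × String))) : List String :=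
  let r := events.foldl (fun (st : List String × PySem.Set String) event =>
    let d := PySem.Dict.mk event
    let decision := PySem.Str.strip (d.getD "decision" "")
    let action := match d.get? "action" with
      | some v => PySem.Str.strip v
      | none => ""
    let status := PySem.Str.strip (d.getD "status" "")
    if status = "stable" ∨ status = "executed_ok" then st
    else
      let token := if action = "" then decision else action
      if token = "" ∨ PySem.Set.contains st.2 token then st
      else (st.1 ++ [token], PySem.Set.add st.2 token)) ([], PySem.Set.empty)
  r.1.take 8

-- ===== PORT B =====
-- Source B's token_of: None for a skipped status, else the stripped 'action or decision'
def pvTokenOf (event : List (String × String)) : Option String :=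
  let d := PySem.Dict.mk event
  let status := PySem.Str.strip (d.getD "status" "")
  if status = "stable" ∨ status = "executed_ok" then none
  else
    let action := match d.get? "action" with
      | some v => PySem.Str.strip v
      | none => ""
    some (if action = "" then PySem.Str.strip (d.getD "decision" "") else action)

-- Source B's while loop: pop the head token; if truthy, keep it and purge its duplicates from the rest
def pvLoop : List (Option String) → List String → List String
  | [], out => out
  | t :: rest, out =>
    if out.length < 8 then
      if t ≠ none ∧ t ≠ some "" then
        pvLoop (rest.filter (fun u => u ≠ t)) (out ++ t.toList)
      else pvLoop rest out
    else out
termination_by rest _ => rest.length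
decreasing_by all_goals (simp; try exact le_trans (List.length_filter_le _ _) (by simp))

def build_pending_actions_py_alt (events : List (List (String × String))) : List String :=
  pvLoop (events.map pvTokenOf) []

-- ===== PRECONDITION & SPEC =====
def Spec_build_pending_actions_py (events : List (List (String × String))) (out : List String) : Prop := out = build_pending_actions_py_alt events
instance (events : List (List (String × String))) (out : List String) : Decidable (Spec_build_pending_actions_py events out) := by unfold Spec_build_pending_actions_py; infer_instance

-- ===== CLAIM (what is proved, stated in full; the proofs are below) =====
def Claim_equal_build_pending_actions_py : Prop := ∀ (events : List (List (String × String))), Dom_build_pending_actions_py events → Spec_build_pending_actions_py events (build_pending_actions_py events)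

-- ===== LEMMAS AND PROOFS =====

-- each event's token, with a skipped event flattened to "" (both programs treat them alike)
def pvTok (event : List (String × String)) : String := (pvTokenOf event).getD ""

-- A's loop body on the flattened token
def pvF (out : List String) (t : String) : List String :=
  if t = "" ∨ PySem.Set.contains out t then out else out ++ [t]

-- ordered dedup of the nonempty tokens, selection style
def pvDedupF : List String → List String
  | [] => []
  | t :: r => if t = "" then pvDedupF r else t :: pvDedupF (r.filter (fun u => u ≠ t))
termination_by l => l.length
decreasing_by all_goals (simp; try exact le_trans (List.length_filter_le _ _) (by simp))

-- string-level version of B's loop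
def pvLoop' : List String → List String → List String
  | [], out => out
  | t :: rest, out =>
    if out.length < 8 then
      if t ≠ "" then pvLoop' (rest.filter (fun u => u ≠ t)) (out ++ [t])
      else pvLoop' rest out
    else out
termination_by rest _ => rest.length
decreasing_by all_goals (simp; try exact le_trans (List.length_filter_le _ _) (by simp))

lemma pv_map_getD_filter (rest : List (Option String)) (s : String) (hs : s ≠ "") :
    (rest.filter (fun u => u ≠ some s)).map (fun t => t.getD "") =
    (rest.map (fun t => t.getD "")).filter (fun u => u ≠ s) := by
  induction rest with
  | nil => rfl
  | cons u r ih =>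
    simp only [ne_eq, decide_not] at ih
    cases u with
    | none => simp only [List.filter_cons, List.map_cons]; simp [hs.symm, ih]
    | some v =>
      by_cases hv : v = s
      · simp only [List.filter_cons, List.map_cons]; simp [hv, ih]
      · simp only [List.filter_cons, List.map_cons]; simp [hv, ih]

lemma pvLoop_eq_loop' : ∀ (rest : List (Option String)) (out : List String),
    pvLoop rest out = pvLoop' (rest.map (fun t => t.getD "")) out := by
  intro rest out
  induction rest, out using pvLoop.induct with
  | case1 out => simp [pvLoop, pvLoop']
  | case2 t rest out h1 h2 ih =>
    obtain ⟨hn, he⟩ := h2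
    cases t with
    | none => exact absurd rfl hn
    | some s =>
      have hs : s ≠ "" := fun h => he (by simp [h])
      rw [pvLoop]
      simp only [List.map_cons]
      rw [pvLoop']
      simp only [if_pos h1, if_pos (by simpa using hs), Option.getD_some, Option.toList_some]
      rw [if_pos (show some s ≠ none ∧ some s ≠ some "" from ⟨hn, he⟩)]
      rw [List.unattach_filter (g := fun u => decide (u ≠ some s)) (hf := by intro x h; rfl),
        List.unattach_attach] at ih
      simp only [Option.toList_some] at ih
      rw [ih, pv_map_getD_filter rest s hs]
      rfl
  | case3 t rest out h1 h2 ih =>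
    have ht : t.getD "" = "" := by
      cases t with
      | none => rfl
      | some s =>
        by_cases hs : s = ""
        · simp [hs]
        · exact absurd ⟨by simp, by simpa using hs⟩ h2
    rw [pvLoop]
    simp only [List.map_cons, ht]
    rw [pvLoop']
    simp only [if_pos h1, if_neg h2]
    rw [if_neg (show ¬(("" : String) ≠ "") from fun h => h rfl)]
    exact ih
  | case4 t rest out h1 =>
    rw [pvLoop]
    simp only [List.map_cons]
    rw [pvLoop']
    simp [if_neg h1]

-- A's loop body equals the pvF/pvTok form
lemma pv_body_eq :
    (fun (st : List String × PySem.Set String) event =>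
      let d := PySem.Dict.mk event
      let decision := PySem.Str.strip (d.getD "decision" "")
      let action := match d.get? "action" with
        | some v => PySem.Str.strip v
        | none => ""
      let status := PySem.Str.strip (d.getD "status" "")
      if status = "stable" ∨ status = "executed_ok" then st
      else
        let token := if action = "" then decision else action
        if token = "" ∨ PySem.Set.contains st.2 token then st
        else (st.1 ++ [token], PySem.Set.add st.2 token))
    = (fun (st : List String × PySem.Set String) (event : List (String × String)) =>
        if pvTok event = "" ∨ PySem.Set.contains st.2 (pvTok event) then st
        else (st.1 ++ [pvTok event], PySem.Set.add st.2 (pvTok event))) := by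
  funext st event
  simp only [pvTok, pvTokenOf]
  split_ifs with h <;> simp_all

-- A's paired fold keeps seen (as a list) equal to out
lemma pvA_pair (events : List (List (String × String))) :
    ∀ out : List String,
      events.foldl (fun (st : List String × PySem.Set String) event =>
        if pvTok event = "" ∨ PySem.Set.contains st.2 (pvTok event) then st
        else (st.1 ++ [pvTok event], PySem.Set.add st.2 (pvTok event))) (out, out)
      = (events.foldl (fun o e => pvF o (pvTok e)) out,
         events.foldl (fun o e => pvF o (pvTok e)) out) := by
  induction events with
  | nil => intro out; simp
  | cons e es ih =>
    intro out
    simp only [List.foldl_cons, pvF]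
    split_ifs with h
    · exact ih out
    · have : PySem.Set.add out (pvTok e) = out ++ [pvTok e] := by
        simp only [PySem.Set.add]
        rw [if_neg]
        intro hc
        exact h (Or.inr hc)
      rw [this]
      exact ih (out ++ [pvTok e])

lemma pv_filter_filter (r out : List String) (t : String) :
    r.filter (fun u => !decide (u ∈ out ++ [t])) =
    (r.filter (fun u => !decide (u ∈ out))).filter (fun u => !decide (u = t)) := by
  rw [List.filter_filter]
  apply List.filter_congr
  intro u _
  by_cases h1 : u ∈ out <;> by_cases h2 : u = t <;> simp [h1, h2]

-- foldl pvF from out is out ++ dedup of the not-yet-seen tokens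
lemma pvF_eq_dedup (ts : List String) : ∀ out : List String,
    ts.foldl pvF out = out ++ pvDedupF (ts.filter (fun t => !decide (t ∈ out))) := by
  induction ts with
  | nil => intro out; simp [pvDedupF]
  | cons t r ih =>
    intro out
    simp only [List.foldl_cons, List.filter_cons]
    by_cases ht : t = ""
    · subst ht
      rw [show pvF out "" = out from by simp [pvF], ih out]
      by_cases h0 : ("" : String) ∈ out
      · simp [h0]
      · simp only [h0, decide_false, Bool.not_false, if_true]
        rw [show pvDedupF ("" :: (r.filter (fun u => !decide (u ∈ out))))
            = pvDedupF (r.filter (fun u => !decide (u ∈ out))) from by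
          rw [pvDedupF]; simp]
    · by_cases hm : t ∈ out
      · rw [show pvF out t = out from by
          simp only [pvF]
          rw [if_pos (Or.inr (by simpa [PySem.Set.contains] using hm))], ih out]
        simp [hm]
      · rw [show pvF out t = out ++ [t] from by
          simp only [pvF]
          rw [if_neg]
          rintro (h | h)
          · exact ht h
          · exact hm (by simpa [PySem.Set.contains] using h), ih (out ++ [t])]
        simp only [hm, decide_false, Bool.not_false, if_true]
        rw [pv_filter_filter r out t]
        rw [show pvDedupF (t :: (r.filter (fun u => !decide (u ∈ out))))
            = t :: pvDedupF ((r.filter (fun u => !decide (u ∈ out))).filter (fun u => !decide (u = t))) from by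
          rw [pvDedupF]; simp [ht]]
        simp

lemma pvLoop'_eq_take : ∀ (ts out : List String),
    pvLoop' ts out = out ++ (pvDedupF ts).take (8 - out.length) := by
  intro ts out
  induction ts, out using pvLoop'.induct with
  | case1 out => simp [pvLoop', pvDedupF]
  | case2 t rest out h1 h2 ih =>
    rw [List.unattach_filter (g := fun u => decide (u ≠ t)) (hf := by intro x h; rfl),
      List.unattach_attach] at ih
    rw [pvLoop', if_pos h1, if_pos h2, ih]
    rw [show pvDedupF (t :: rest) = t :: pvDedupF (rest.filter fun u => u ≠ t) from by
      rw [pvDedupF]; simp [h2]]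
    have h8 : 8 - out.length = (8 - (out.length + 1)) + 1 := by omega
    rw [h8, List.take_succ_cons]
    simp
  | case3 t rest out h1 h2 ih =>
    have ht : t = "" := by simpa using h2
    rw [pvLoop', if_pos h1, if_neg h2, ih, ht]
    rw [show pvDedupF ("" :: rest) = pvDedupF rest from by rw [pvDedupF]; simp]
  | case4 t rest out h1 =>
    rw [pvLoop', if_neg h1]
    have : 8 - out.length = 0 := by omega
    simp [this]

lemma pvA_eq (events : List (List (String × String))) :
    build_pending_actions_py events = ((events.map pvTok).foldl pvF []).take 8 := by
  unfold build_pending_actions_py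
  rw [pv_body_eq]
  have h := pvA_pair events []
  simp only [PySem.Set.empty]
  rw [h, List.foldl_map]

-- ===== VERDICT (by name: the statement is the Claim_ definition above) =====
theorem build_pending_actions_py_spec : Claim_equal_build_pending_actions_py := by
  intro events _
  unfold Spec_build_pending_actions_py build_pending_actions_py_alt
  rw [pvA_eq, pvLoop_eq_loop', List.map_map, pvLoop'_eq_take]
  rw [show (fun (t : Option String) => t.getD "") ∘ pvTokenOf = pvTok from rfl]
  rw [pvF_eq_dedup]
  simp
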